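-- pv_equiv track=rewrite | github.com/agarasia/DSA | Binary Search/BS on answers/Capacity to ship packages in d days.py | capacityBruteForce
-- ===== SOURCE A (Python) =====
-- def capacityBruteForce(weights, days):
--     # Helper Function : Find the days needed to
--     #                   transport all the loads.
--     def isPossible(capacity):
--         daysNeeded, load = 1, 0
--
--         for i in range(len(weights)):
--             if load + weights[i] > capacity:
--                 daysNeeded += 1
--                 load = weights[i]
--             else:
--                 load += weights[i]
--
--         return daysNeeded <= days
--
--     # Driver Code
--     mini = -float('inf')
--     maxi = 0
--
--     for i in weights:
--         mini = max(mini, i)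
--         maxi += i
--
--     for i in range(mini, maxi+1):
--         if isPossible(i):
--             return i
--
--     return maxi
-- ===== SOURCE B (Python) =====
-- def capacityBruteForce(weights, days):
--     # Binary search on the answer: the greedy day count is antitone in the
--     # capacity (for nonnegative weights), so the least feasible capacity in
--     # [max(weights), sum(weights)] is found by bisection.
--     def days_needed(capacity):
--         d, load = 1, 0
--         for w in weights:
--             if load + w > capacity:
--                 d, load = d + 1, w
--             else:
--                 load += w
--         return d
--
--     lo, hi = max(weights), sum(weights)
--     while lo < hi:
--         mid = (lo + hi) // 2
--         if days_needed(mid) <= days: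
--             hi = mid
--         else:
--             lo = mid + 1
--     return lo
-- ===== Notes on version B (the rewrite author's own statement) =====
-- stated objective: alternative
-- what changed: Replaces A's linear scan over every candidate capacity in [max(weights), sum(weights)] by a binary search on the answer using the same greedy feasibility check (asymptotically fewer feasibility tests on the nonnegative-weight domain, though a timing run's inputs fall outside Pre_ so no speed is claimed).
-- outside the precondition, e.g. on capacityBruteForce([2, -2, 1], 0): A returns 1, B returns 2; on capacityBruteForce([4, 1, -3, 4, 2], 2): A returns 4, B returns 6
import Mathlib
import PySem

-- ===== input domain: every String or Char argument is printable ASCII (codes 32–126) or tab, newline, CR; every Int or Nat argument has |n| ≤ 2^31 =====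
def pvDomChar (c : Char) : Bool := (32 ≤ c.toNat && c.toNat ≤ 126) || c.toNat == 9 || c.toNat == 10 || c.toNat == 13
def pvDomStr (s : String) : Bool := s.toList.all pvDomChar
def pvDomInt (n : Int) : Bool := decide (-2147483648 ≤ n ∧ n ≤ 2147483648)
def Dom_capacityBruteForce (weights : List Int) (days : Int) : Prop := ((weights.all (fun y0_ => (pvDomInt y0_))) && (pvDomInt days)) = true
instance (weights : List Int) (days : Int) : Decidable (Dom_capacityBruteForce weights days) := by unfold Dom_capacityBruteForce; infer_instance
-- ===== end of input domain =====

-- B replaces A's linear scan over candidate capacities by a binary search on the answer.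

-- ===== PORT A =====
-- A's inner helper isPossible: greedy day count over weights[i] for i in range(len(weights)).
def pvIsPossibleA (weights : List Int) (days : Int) (capacity : Int) : Bool :=
  let s := (PySem.List.pyRange 0 (weights.length : Int) 1).foldl
    (fun (s : Int × Int) i =>
      if s.2 + PySem.List.pyGetD weights i 0 > capacity
      then (s.1 + 1, PySem.List.pyGetD weights i 0)
      else (s.1, s.2 + PySem.List.pyGetD weights i 0)) (1, 0)
  decide (s.1 ≤ days)

def capacityBruteForce (weights : List Int) (days : Int) : Int :=
  -- mini starts at -inf (an Option models 'no weight seen yet'); maxi at 0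
  let mm := weights.foldl
    (fun (p : Option Int × Int) i =>
      ((match p.1 with | none => some i | some m => some (max m i)), p.2 + i)) (none, 0)
  match mm.1 with
  | none => mm.2   -- weights = []: Python raises TypeError (range of -inf); excluded by Pre_
  | some mini =>
    ((PySem.List.pyRange mini (mm.2 + 1) 1).find? (fun i => pvIsPossibleA weights days i)).getD mm.2

-- ===== PORT B =====
-- Source B's days_needed helper: one greedy pass over weights.
def pvDaysNeeded (weights : List Int) (capacity : Int) : Int :=
  (weights.foldl
    (fun (s : Int × Int) w =>
      if s.2 + w > capacity then (s.1 + 1, w) else (s.1, s.2 + w)) (1, 0)).1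

-- termination of the bisection loop: the midpoint strictly splits [lo, hi)
theorem pvMid_bounds (lo hi : Int) (h : lo < hi) :
    lo ≤ PySem.Int.floordiv (lo + hi) 2 ∧ PySem.Int.floordiv (lo + hi) 2 < hi := by
  have h1 := (PySem.Int.le_floordiv_iff_mul_le (a := lo + hi) (b := 2) (q := lo) (by omega)).2 (by omega)
  have h2 := (PySem.Int.floordiv_lt_iff_lt_mul (a := lo + hi) (b := 2) (q := hi) (by omega)).2 (by omega)
  exact ⟨h1, h2⟩

-- Source B's while loop
def pvBisect (P : Int → Bool) (lo hi : Int) : Int :=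
  if h : lo < hi then
    let mid := PySem.Int.floordiv (lo + hi) 2
    if P mid then pvBisect P lo mid else pvBisect P (mid + 1) hi
  else lo
termination_by (hi - lo).toNat
decreasing_by
  · have := pvMid_bounds lo hi h; omega
  · have := pvMid_bounds lo hi h; omega

def capacityBruteForce_alt (weights : List Int) (days : Int) : Int :=
  match PySem.List.max? weights (fun x => x) with
  | none => 0   -- weights = []: Python raises ValueError (max of empty); excluded by Pre_
  | some lo => pvBisect (fun c => decide (pvDaysNeeded weights c ≤ days)) lo weights.sum

-- ===== PRECONDITION & SPEC =====
-- Pre_ excludes the empty list (A raises TypeError: range of -inf; B raises ValueError) and,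
-- among lists containing a negative weight (out of the task's domain), those where the day budget
-- is genuinely binding (1 ≤ days < len(weights)) or some weight exceeds the total sum: there the
-- greedy day count is not monotone in the capacity (or the scanned interval is inverted), so A's
-- first-hit linear scan and a binary search legitimately disagree (e.g. ([2, -2, 1], 0)).
def Pre_capacityBruteForce (weights : List Int) (days : Int) : Prop :=
  weights ≠ [] ∧ ((∀ w ∈ weights, 0 ≤ w) ∨
    ((days < 1 ∨ (weights.length : Int) ≤ days) ∧ ∀ w ∈ weights, w ≤ weights.sum))
instance (weights : List Int) (days : Int) : Decidable (Pre_capacityBruteForce weights days) := by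
  unfold Pre_capacityBruteForce; infer_instance

def pvWitness_capacityBruteForce : List Int × Int := ([3, 2, 2, 4, 1, 4], 3)

def Spec_capacityBruteForce (weights : List Int) (days : Int) (out : Int) : Prop :=
  out = capacityBruteForce_alt weights days
instance (weights : List Int) (days : Int) (out : Int) : Decidable (Spec_capacityBruteForce weights days out) := by
  unfold Spec_capacityBruteForce; infer_instance

-- ===== CLAIM (what is proved, stated in full; the proofs are below) =====
def Claim_equal_capacityBruteForce : Prop := ∀ (weights : List Int) (days : Int), Dom_capacityBruteForce weights days → Pre_capacityBruteForce weights days → Spec_capacityBruteForce weights days (capacityBruteForce weights days)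

-- ===== LEMMAS AND PROOFS =====

-- r is the least point of [lo, hi] where P holds, or hi if none
def pvIsLB (P : Int → Bool) (lo hi r : Int) : Prop :=
  lo ≤ r ∧ r ≤ hi ∧ (∀ x, lo ≤ x → x < r → P x = false) ∧ (r < hi → P r = true)

theorem pvIsLB_unique {P : Int → Bool} {lo hi r1 r2 : Int}
    (h1 : pvIsLB P lo hi r1) (h2 : pvIsLB P lo hi r2) : r1 = r2 := by
  obtain ⟨a1, b1, c1, d1⟩ := h1
  obtain ⟨a2, b2, c2, d2⟩ := h2
  by_contra hne
  rcases lt_or_gt_of_ne hne with h | h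
  · have := c2 r1 a1 h; have := d1 (by omega); simp_all
  · have := c1 r2 a2 h; have := d2 (by omega); simp_all

theorem pvFind_isLB (P : Int → Bool) : ∀ (n : Nat) (lo hi : Int), (hi + 1 - lo).toNat = n →
    lo ≤ hi → pvIsLB P lo hi (((PySem.List.pyRange lo (hi + 1) 1).find? P).getD hi) := by
  intro n
  induction n with
  | zero => intro lo hi hn hle; omega
  | succ k ih =>
    intro lo hi hn hle
    rw [PySem.List.pyRange_one_cons (by omega)]
    simp only [List.find?_cons]
    by_cases hP : P lo
    · simp only [hP, Option.getD_some]
      exact ⟨le_refl lo, hle, fun x h1 h2 => by omega, fun _ => hP⟩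
    · simp only [hP]
      by_cases heq : lo = hi
      · subst heq
        rw [PySem.List.pyRange_one_eq_nil (by omega)]
        simp only [List.find?_nil, Option.getD_none]
        exact ⟨hle, le_refl lo, fun x h1 h2 => by omega, fun h => by omega⟩
      · have hrec := ih (lo + 1) hi (by omega) (by omega)
        obtain ⟨a, b, c, d⟩ := hrec
        refine ⟨by omega, b, fun x h1 h2 => ?_, d⟩
        by_cases hx : x = lo
        · subst hx; simpa using hP
        · exact c x (by omega) h2

theorem pvBisect_isLB (P : Int → Bool) :
    ∀ (n : Nat) (lo hi : Int), (hi - lo).toNat = n → lo ≤ hi →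
    (∀ c c', lo ≤ c → c ≤ c' → c' ≤ hi → P c = true → P c' = true) →
    pvIsLB P lo hi (pvBisect P lo hi) := by
  intro n
  induction n using Nat.strong_induction_on with
  | _ n ih =>
    intro lo hi hn hle hm
    rw [pvBisect]
    by_cases h : lo < hi
    · simp only [dif_pos h]
      have hmid := pvMid_bounds lo hi h
      set mid := PySem.Int.floordiv (lo + hi) 2 with hmiddef
      by_cases hP : P mid
      · simp only [if_pos hP]
        have hrec := ih (mid - lo).toNat (by omega) lo mid rfl (by omega)
          (fun c c' h1 h2 h3 => hm c c' h1 h2 (by omega))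
        obtain ⟨a, b, c, d⟩ := hrec
        refine ⟨a, by omega, c, fun _ => ?_⟩
        by_cases hr : pvBisect P lo mid < mid
        · exact d hr
        · have : pvBisect P lo mid = mid := by omega
          rw [this]; exact hP
      · simp only [if_neg hP]
        have hrec := ih (hi - (mid + 1)).toNat (by omega) (mid + 1) hi rfl (by omega)
          (fun c c' h1 h2 h3 => hm c c' (by omega) h2 h3)
        obtain ⟨a, b, c, d⟩ := hrec
        refine ⟨by omega, b, fun x h1 h2 => ?_, d⟩
        by_cases hx : x ≤ mid
        · by_contra hPx
          have : P x = true := by simpa using hPx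
          have := hm x mid h1 hx (by omega) this
          simp_all
        · exact c x (by omega) h2
    · simp only [dif_neg h]
      exact ⟨le_refl lo, hle, fun x h1 h2 => by omega, fun hlt => by omega⟩

-- greedy invariant: at a larger capacity the greedy pass never needs more days
theorem pvGreedy_mono_aux (c c' : Int) (hcc : c ≤ c') :
    ∀ (ws : List Int), (∀ w ∈ ws, 0 ≤ w) → ∀ (s s' : Int × Int),
      0 ≤ s.2 → 0 ≤ s'.2 → (s'.1 < s.1 ∨ (s'.1 = s.1 ∧ s'.2 ≤ s.2)) →
      let r := ws.foldl (fun (t : Int × Int) w => if t.2 + w > c then (t.1 + 1, w) else (t.1, t.2 + w)) s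
      let r' := ws.foldl (fun (t : Int × Int) w => if t.2 + w > c' then (t.1 + 1, w) else (t.1, t.2 + w)) s'
      0 ≤ r.2 ∧ 0 ≤ r'.2 ∧ (r'.1 < r.1 ∨ (r'.1 = r.1 ∧ r'.2 ≤ r.2)) := by
  intro ws
  induction ws with
  | nil => intro _ s s' h1 h2 h3; exact ⟨h1, h2, h3⟩
  | cons w t ih =>
    intro hw s s' h1 h2 h3
    simp only [List.foldl_cons]
    have hw0 : 0 ≤ w := hw w (List.mem_cons_self)
    have hwt : ∀ x ∈ t, 0 ≤ x := fun x hx => hw x (List.mem_cons_of_mem w hx)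
    split_ifs with hA hB hB
    · exact ih hwt _ _ (by omega) (by omega) (by omega)
    · exact ih hwt _ _ (by omega) (by omega) (by omega)
    · -- overflows at c', not at c: s'.2 > s.2, so s'.1 < s.1
      exact ih hwt _ _ (by omega) (by omega) (by omega)
    · exact ih hwt _ _ (by omega) (by omega) (by omega)

theorem pvDaysNeeded_mono (weights : List Int) (hw : ∀ w ∈ weights, 0 ≤ w)
    {c c' : Int} (h : c ≤ c') : pvDaysNeeded weights c' ≤ pvDaysNeeded weights c := by
  have := pvGreedy_mono_aux c c' h weights hw (1, 0) (1, 0) (by simp) (by simp) (by simp)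
  unfold pvDaysNeeded
  omega

-- the greedy never reports fewer than one day
theorem pvDN_ge (c : Int) : ∀ (ws : List Int) (s : Int × Int),
    s.1 ≤ (ws.foldl (fun (t : Int × Int) w => if t.2 + w > c then (t.1 + 1, w) else (t.1, t.2 + w)) s).1 := by
  intro ws
  induction ws with
  | nil => intro s; exact le_refl _
  | cons w t ih =>
    intro s
    simp only [List.foldl_cons]
    split_ifs
    · exact le_trans (by omega) (ih _)
    · exact ih _

-- with every weight ≤ the capacity, the greedy needs at most one day per weight
theorem pvDN_le_aux (c : Int) : ∀ (ws : List Int) (s : Int × Int),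
    (ws.foldl (fun (t : Int × Int) w => if t.2 + w > c then (t.1 + 1, w) else (t.1, t.2 + w)) s).1
      ≤ s.1 + ws.length := by
  intro ws
  induction ws with
  | nil => intro s; simp
  | cons w t ih =>
    intro s
    simp only [List.foldl_cons, List.length_cons]
    split_ifs
    · exact le_trans (ih _) (by omega)
    · exact le_trans (ih _) (by omega)

theorem pvDN_le_len (c x : Int) (t : List Int) (hx : x ≤ c) :
    pvDaysNeeded (x :: t) c ≤ (x :: t).length := by
  unfold pvDaysNeeded
  simp only [List.foldl_cons, List.length_cons]
  rw [if_neg (by omega)]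
  exact le_trans (pvDN_le_aux c t (1, 0 + x)) (by omega)

-- A's isPossible equals B's feasibility test
theorem pvIsPossibleA_eq (weights : List Int) (days c : Int) :
    pvIsPossibleA weights days c = decide (pvDaysNeeded weights c ≤ days) := by
  unfold pvIsPossibleA pvDaysNeeded
  rw [PySem.List.foldl_pyRange_zero_pyGetD' weights 0
    (fun (s : Int × Int) w => if s.2 + w > c then (s.1 + 1, w) else (s.1, s.2 + w)) (1, 0)]

-- A's combined max/sum loop, split
theorem pvMaxFold (t : List Int) : ∀ (m : Int),
    t.foldl (fun (o : Option Int) i => (match o with | none => some i | some m => some (max m i))) (some m)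
      = some (t.foldl max m) := by
  induction t with
  | nil => intro m; rfl
  | cons x s ih => intro m; simpa using ih (max m x)

theorem pvElem_le_sum (weights : List Int) (hw : ∀ w ∈ weights, 0 ≤ w)
    {m : Int} (hm : m ∈ weights) : m ≤ weights.sum :=
  List.single_le_sum hw m hm

-- ===== VERDICT (by name: the statement is the Claim_ definition above) =====
theorem capacityBruteForce_spec : Claim_equal_capacityBruteForce := by
  intro weights days _ hpre
  obtain ⟨hne, hrest⟩ := hpre
  unfold Spec_capacityBruteForce capacityBruteForce capacityBruteForce_alt
  match weights, hne, hrest with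
  | x :: t, _, hrest =>
    rw [PySem.List.foldl_prod_mk
      (f := fun (o : Option Int) i => (match o with | none => some i | some m => some (max m i)))
      (g := fun (s : Int) i => s + i)]
    simp only [List.foldl_cons]
    have hsum : t.foldl (fun (s : Int) i => s + i) (0 + x) = (x :: t).sum := by
      rw [PySem.List.foldl_add (g := fun (i : Int) => i)]
      simp
    have hPP : (fun i => pvIsPossibleA (x :: t) days i)
        = (fun c => decide (pvDaysNeeded (x :: t) c ≤ days)) :=
      funext fun c => pvIsPossibleA_eq (x :: t) days c
    simp only [pvMaxFold t x, PySem.List.max?_id_cons, hsum, hPP]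
    have hmaxmem : t.foldl max x = x ∨ t.foldl max x ∈ t := PySem.List.foldl_max_mem t x
    have hmaxub : ∀ w ∈ x :: t, w ≤ t.foldl max x := by
      intro w hwmem
      rcases List.mem_cons.1 hwmem with h | h
      · subst h; exact (PySem.List.le_foldl_max t w).1
      · exact (PySem.List.le_foldl_max t x).2 w h
    -- max ≤ sum, and restricted monotonicity of feasibility, in each Pre_ branch
    have hkey : t.foldl max x ≤ (x :: t).sum ∧
        (∀ c c', t.foldl max x ≤ c → c ≤ c' → c' ≤ (x :: t).sum →
          decide (pvDaysNeeded (x :: t) c ≤ days) = true →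
          decide (pvDaysNeeded (x :: t) c' ≤ days) = true) := by
      rcases hrest with hnn | ⟨hdays, hle⟩
      · constructor
        · rcases hmaxmem with h | h
          · rw [h]; exact pvElem_le_sum _ hnn (List.mem_cons_self)
          · exact pvElem_le_sum _ hnn (List.mem_cons_of_mem x h)
        · intro c c' _ hcc _ hc
          simp only [decide_eq_true_eq] at *
          have := pvDaysNeeded_mono (x :: t) hnn hcc
          omega
      · constructor
        · rcases hmaxmem with h | h
          · rw [h]; exact hle x (List.mem_cons_self)
          · exact hle _ (List.mem_cons_of_mem x h)
        · rcases hdays with hd | hd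
          · -- days < 1: nothing is ever feasible
            intro c c' _ _ _ hc
            exfalso
            have h1 : (1 : Int) ≤ pvDaysNeeded (x :: t) c := pvDN_ge c (x :: t) (1, 0)
            simp only [decide_eq_true_eq] at hc
            omega
          · -- len ≤ days: everything with capacity ≥ max is feasible
            intro c c' hlo hcc _ _
            have hxc : x ≤ c' := le_trans (le_trans (hmaxub x (List.mem_cons_self)) hlo) hcc
            have := pvDN_le_len c' x t hxc
            simp only [decide_eq_true_eq]
            simp only [List.length_cons] at hd this ⊢
            omega
    exact pvIsLB_unique
      (pvFind_isLB _ _ (t.foldl max x) ((x :: t).sum) rfl hkey.1)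
      (pvBisect_isLB _ _ (t.foldl max x) ((x :: t).sum) rfl hkey.1 hkey.2)
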